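-- pv_equiv track=rewrite | github.com/abhibp1993/prefltlf2pdfa | prefltlf2pdfa/semantics.py | semantics_forall_forall
-- ===== SOURCE A (Python) =====
-- def semantics_forall_forall(preorder, source, target):
--     """
--     Check if all formulas in the source set satisfy the preorder for all
--     formulas in the target set.
--
--     Args:
--         preorder (list of tuple): The preorder defining the preference relation.
--         source (list): List of binary values representing the source formulas.
--         target (list): List of binary values representing the target formulas.
--
--     Returns:
--         bool: True if the semantic condition is satisfied, False otherwise.
--     """
--     sat_source = {i for i in range(len(source)) if source[i] == 1}
--     sat_target = {i for i in range(len(target)) if target[i] == 1}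
--
--     # Force empty set to be indifferent to each other. Required for preference graph to be preorder.
--     if sat_source == sat_target:
--         return True
--
--     if sat_target == set():
--         return False
--
--     for alpha_to in sat_target:
--         if not all((alpha_to, alpha_from) in preorder for alpha_from in sat_source):
--             return False
--
--     return True
-- ===== SOURCE B (Python) =====
-- def semantics_forall_forall(preorder, source, target):
--     sat_source = {i for i, v in enumerate(source) if v == 1}
--     sat_target = {i for i, v in enumerate(target) if v == 1}
--
--     if sat_source == sat_target:
--         return True
--     if not sat_target:
--         return False
--
--     # Counting argument: the condition holds iff every pair of the product
--     # sat_target x sat_source occurs in preorder.  Collect the distinct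
--     # relevant pairs in one pass and compare cardinalities.
--     found = {(t, s) for (t, s) in preorder if t in sat_target and s in sat_source}
--     return len(found) == len(sat_target) * len(sat_source)
-- ===== Notes on version B (the rewrite author's own statement) =====
-- stated objective: alternative
-- what changed: B replaces A's nested forall/forall scan of preorder by a cardinality argument: it collects in one pass the distinct preorder pairs lying in sat_target x sat_source and returns whether their count equals |sat_target|*|sat_source|.
import Mathlib
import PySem

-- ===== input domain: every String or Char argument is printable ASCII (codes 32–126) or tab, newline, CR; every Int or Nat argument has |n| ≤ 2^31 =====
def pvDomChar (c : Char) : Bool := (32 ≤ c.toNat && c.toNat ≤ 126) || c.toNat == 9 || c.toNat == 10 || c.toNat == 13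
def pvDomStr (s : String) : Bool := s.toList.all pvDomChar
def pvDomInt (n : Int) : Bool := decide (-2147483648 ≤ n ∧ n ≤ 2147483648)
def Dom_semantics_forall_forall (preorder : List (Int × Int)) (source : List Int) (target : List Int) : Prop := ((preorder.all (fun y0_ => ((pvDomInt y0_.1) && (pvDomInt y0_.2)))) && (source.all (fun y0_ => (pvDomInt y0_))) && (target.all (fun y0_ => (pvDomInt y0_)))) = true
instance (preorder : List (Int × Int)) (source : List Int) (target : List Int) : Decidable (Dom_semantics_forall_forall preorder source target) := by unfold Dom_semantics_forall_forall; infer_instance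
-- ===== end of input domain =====

-- B replaces A's nested forall/forall scan of preorder with a one-pass cardinality check: count the distinct preorder pairs inside sat_target × sat_source and compare with |sat_target|·|sat_source| (alternative algorithm; same return value).

-- ===== PORT A =====
-- {i for i in range(len(xs)) if xs[i] == 1}; the index is always in range, so pyGetD is exact here
def pvSatA (xs : List Int) : PySem.Set Int :=
  (PySem.List.pyRange 0 (xs.length : Int) 1).filter (fun i => PySem.List.pyGetD xs i 0 == 1)

def semantics_forall_forall (preorder : List (Int × Int)) (source : List Int) (target : List Int) : Bool :=
  if PySem.Set.equal (pvSatA source) (pvSatA target) then true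
  else if PySem.Set.equal (pvSatA target) PySem.Set.empty then false
  else (pvSatA target).all (fun alpha_to =>
         (pvSatA source).all (fun alpha_from => preorder.contains (alpha_to, alpha_from)))

-- ===== PORT B =====
-- {i for i, v in enumerate(xs) if v == 1}
def pvSatB (xs : List Int) : PySem.Set Int :=
  PySem.Set.ofList (((PySem.List.enumerate xs 0).filter (fun p => p.2 == 1)).map (·.1))

-- found = {(t, s) for (t, s) in preorder if t in sat_target and s in sat_source}
def pvFound (preorder : List (Int × Int)) (satT satS : PySem.Set Int) : PySem.Set (Int × Int) :=
  PySem.Set.ofList (preorder.filter (fun p => PySem.Set.contains satT p.1 && PySem.Set.contains satS p.2))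

def semantics_forall_forall_alt (preorder : List (Int × Int)) (source : List Int) (target : List Int) : Bool :=
  let satS := pvSatB source
  let satT := pvSatB target
  if PySem.Set.equal satS satT then true
  else if PySem.Set.equal satT PySem.Set.empty then false
  else PySem.Set.len (pvFound preorder satT satS) == PySem.Set.len satT * PySem.Set.len satS

-- ===== PRECONDITION & SPEC =====
def Spec_semantics_forall_forall (preorder : List (Int × Int)) (source : List Int) (target : List Int) (out : Bool) : Prop := out = semantics_forall_forall_alt preorder source target
instance (preorder : List (Int × Int)) (source : List Int) (target : List Int) (out : Bool) : Decidable (Spec_semantics_forall_forall preorder source target out) := by unfold Spec_semantics_forall_forall; infer_instance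

-- ===== CLAIM (what is proved, stated in full; the proofs are below) =====
def Claim_equal_semantics_forall_forall : Prop := ∀ (preorder : List (Int × Int)) (source : List Int) (target : List Int), Dom_semantics_forall_forall preorder source target → Spec_semantics_forall_forall preorder source target (semantics_forall_forall preorder source target)

-- ===== LEMMAS AND PROOFS =====

-- the two set comprehensions build the same index list
theorem pvSat_eq (xs : List Int) : pvSatB xs = pvSatA xs := by
  unfold pvSatA pvSatB
  have hnd : ((((PySem.List.enumerate xs 0).filter (fun p => p.2 == 1)).map (·.1)) : List Int).Nodup := by
    have hsub : (((PySem.List.enumerate xs 0).filter (fun p => p.2 == 1)).map (·.1)).Sublist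
        ((PySem.List.enumerate xs 0).map (·.1)) :=
      List.Sublist.map _ List.filter_sublist
    have : ((PySem.List.enumerate xs 0).map (·.1)).Nodup := by
      rw [PySem.List.map_fst_enumerate]
      exact PySem.List.nodup_pyRange_one _ _
    exact this.sublist hsub
  rw [PySem.Set.ofList_eq_self_of_nodup _ hnd]
  rw [PySem.List.enumerate_eq_map_pyRange (d := 0), List.filter_map, List.map_map]
  simp [Function.comp_def]

theorem pvSatA_nodup (xs : List Int) : (pvSatA xs).Nodup :=
  (PySem.List.nodup_pyRange_one _ _).filter _

-- the counting check equals A's nested forall, for Nodup index lists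
theorem count_iff (preorder : List (Int × Int)) (T S : List Int) (hT : T.Nodup) (hS : S.Nodup) :
    (pvFound preorder T S).length = T.length * S.length ↔
      ∀ t ∈ T, ∀ s ∈ S, (t, s) ∈ preorder := by
  have hmemF : ∀ p : Int × Int, p ∈ pvFound preorder T S ↔ p ∈ preorder ∧ p.1 ∈ T ∧ p.2 ∈ S := by
    intro p
    unfold pvFound
    simp [PySem.Set.mem_ofList, List.mem_filter]
  have hndF : (pvFound preorder T S).Nodup := PySem.Set.nodup_ofList _
  have hsub : (pvFound preorder T S).toFinset ⊆ T.toFinset ×ˢ S.toFinset := by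
    intro p hp
    rw [List.mem_toFinset] at hp
    rcases (hmemF p).mp hp with ⟨_, h1, h2⟩
    simp [Finset.mem_product, List.mem_toFinset, h1, h2]
  have hcF : (pvFound preorder T S).toFinset.card = (pvFound preorder T S).length :=
    List.toFinset_card_of_nodup hndF
  have hcP : (T.toFinset ×ˢ S.toFinset).card = T.length * S.length := by
    rw [Finset.card_product, List.toFinset_card_of_nodup hT, List.toFinset_card_of_nodup hS]
  constructor
  · intro h t ht s hs
    have heq : (pvFound preorder T S).toFinset = T.toFinset ×ˢ S.toFinset :=
      Finset.eq_of_subset_of_card_le hsub (by omega)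
    have : (t, s) ∈ (pvFound preorder T S).toFinset := by
      rw [heq]
      simp [Finset.mem_product, List.mem_toFinset, ht, hs]
    rw [List.mem_toFinset] at this
    exact ((hmemF (t, s)).mp this).1
  · intro h
    have hsup : T.toFinset ×ˢ S.toFinset ⊆ (pvFound preorder T S).toFinset := by
      intro p hp
      rw [Finset.mem_product, List.mem_toFinset, List.mem_toFinset] at hp
      rw [List.mem_toFinset, hmemF]
      exact ⟨h p.1 hp.1 p.2 hp.2, hp.1, hp.2⟩
    have heq := congrArg Finset.card (Finset.Subset.antisymm hsub hsup)
    omega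

-- ===== VERDICT (by name: the statement is the Claim_ definition above) =====
theorem semantics_forall_forall_spec : Claim_equal_semantics_forall_forall := by
  intro preorder source target _
  unfold Spec_semantics_forall_forall semantics_forall_forall semantics_forall_forall_alt
  simp only [pvSat_eq]
  by_cases h1 : PySem.Set.equal (pvSatA source) (pvSatA target) = true
  · rw [if_pos h1, if_pos h1]
  · rw [if_neg h1, if_neg h1]
    by_cases h2 : PySem.Set.equal (pvSatA target) PySem.Set.empty = true
    · rw [if_pos h2, if_pos h2]
    · rw [if_neg h2, if_neg h2]
      rw [Bool.eq_iff_iff]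
      have := count_iff preorder (pvSatA target) (pvSatA source) (pvSatA_nodup target) (pvSatA_nodup source)
      simp only [List.all_eq_true, PySem.Set.len, beq_iff_eq]
      rw [← Nat.cast_mul, Nat.cast_inj, this]
      constructor
      · intro h t ht s hs
        simpa using h t ht s hs
      · intro h t ht s hs
        simpa using h t ht s hs
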